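-- pv_equiv track=rewrite | github.com/Holison18/Leetcode-problems | Employee that work the longest time/Employee.py | longestWorkingEmployee
-- ===== SOURCE A (Python) =====
-- def longestWorkingEmployee(n, logs):
--     best_time = best_id = start_time = 0
--     for emp_id,emp_time in logs:
--         time_taken = emp_time - start_time
--         if (time_taken > best_time) or (time_taken == best_time and emp_id < best_id):
--             best_id = emp_id
--             best_time = time_taken
--         start_time = emp_time
--     return best_id
-- ===== SOURCE B (Python) =====
-- def longestWorkingEmployee(n, logs):
--     ends = [t for _, t in logs]
--     cands = [(0, 0)] + [(t - p, i) for (i, t), p in zip(logs, [0] + ends[:-1])]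
--     cands.sort(key=lambda c: (-c[0], c[1]))
--     return cands[0][1]
-- ===== Notes on version B (the rewrite author's own statement) =====
-- stated objective: alternative
-- what changed: Replaces A's fused single-pass running-best loop (threading best_time/best_id/start_time) with a sort-based selection: materialise the (duration, id) candidate list seeded with (0,0), sort it by (-duration, id), and return the id of the first element.
import Mathlib
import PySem

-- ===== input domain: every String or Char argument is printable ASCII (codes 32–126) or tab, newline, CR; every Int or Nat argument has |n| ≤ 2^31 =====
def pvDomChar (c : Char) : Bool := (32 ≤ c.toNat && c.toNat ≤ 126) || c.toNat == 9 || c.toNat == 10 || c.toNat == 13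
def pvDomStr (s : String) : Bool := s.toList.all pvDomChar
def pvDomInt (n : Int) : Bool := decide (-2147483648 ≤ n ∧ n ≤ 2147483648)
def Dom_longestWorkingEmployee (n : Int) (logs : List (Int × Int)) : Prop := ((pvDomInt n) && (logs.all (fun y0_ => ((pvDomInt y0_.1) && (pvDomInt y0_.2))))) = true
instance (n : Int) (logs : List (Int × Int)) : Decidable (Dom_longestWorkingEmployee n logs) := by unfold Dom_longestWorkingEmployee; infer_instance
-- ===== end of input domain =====

-- B replaces A's fused running-best loop with build-candidates, sort by (-duration, id), take the head (objective: alternative, O(n log n) vs O(n)).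

-- ===== PORT A =====
def longestWorkingEmployee (n : Int) (logs : List (Int × Int)) : Int :=
  -- state = (best_time, best_id, start_time), all starting at 0
  let r := logs.foldl (fun (s : Int × Int × Int) (e : Int × Int) =>
    let time_taken := e.2 - s.2.2
    if time_taken > s.1 ∨ (time_taken = s.1 ∧ e.1 < s.2.1) then
      (time_taken, e.1, e.2)
    else
      (s.1, s.2.1, e.2)) (0, 0, 0)
  r.2.1

-- ===== PORT B =====
def longestWorkingEmployee_alt (n : Int) (logs : List (Int × Int)) : Int :=
  let ends := logs.map (fun l => l.2)
  let cands : List (Int × Int) :=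
    (0, 0) :: (logs.zip (0 :: ends.dropLast)).map (fun p => (p.1.2 - p.2, p.1.1))
  -- cands.sort(key=lambda c: (-c[0], c[1])); return cands[0][1] — cands is non-empty by construction
  match PySem.List.sorted2 cands (fun c => -c.1) (fun c => c.2) with
  | c :: _ => c.2
  | [] => 0

-- ===== PRECONDITION & SPEC =====
def Spec_longestWorkingEmployee (n : Int) (logs : List (Int × Int)) (out : Int) : Prop := out = longestWorkingEmployee_alt n logs
instance (n : Int) (logs : List (Int × Int)) (out : Int) : Decidable (Spec_longestWorkingEmployee n logs out) := by unfold Spec_longestWorkingEmployee; infer_instance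

-- ===== CLAIM (what is proved, stated in full; the proofs are below) =====
def Claim_equal_longestWorkingEmployee : Prop := ∀ (n : Int) (logs : List (Int × Int)), Dom_longestWorkingEmployee n logs → Spec_longestWorkingEmployee n logs (longestWorkingEmployee n logs)

-- ===== LEMMAS AND PROOFS =====

-- the sort2 comparison "x sorts before m" for keys (-c.1, c.2)
def pvBefore (a b : Int × Int) : Bool :=
  decide ((-a.1 : Int) < -b.1) || !decide ((-b.1 : Int) < -a.1) && decide (a.2 < b.2)

-- running minimum under pvBefore
def pvStep2 (m x : Int × Int) : Int × Int := if pvBefore x m then x else m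

theorem head?_insertBy {α : Type} (before : α → α → Bool) (x : α) (acc : List α) :
    (PySem.List.insertBy before x acc).head? =
      some (match acc.head? with | none => x | some a => if before x a then x else a) := by
  cases acc with
  | nil => rfl
  | cons a t =>
    simp only [PySem.List.insertBy, List.head?_cons]
    split <;> rfl

theorem head?_foldl_insertBy {α : Type} (before : α → α → Bool) (xs : List α)
    (acc : List α) (a : α) (h : acc.head? = some a) :
    (xs.foldl (fun acc x => PySem.List.insertBy before x acc) acc).head? =
      some (xs.foldl (fun m x => if before x m then x else m) a) := by
  induction xs generalizing acc a with
  | nil => simpa using h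
  | cons x t ih =>
    simp only [List.foldl_cons]
    apply ih
    rw [head?_insertBy, h]

theorem head?_sorted2_cons (c0 : Int × Int) (l : List (Int × Int)) :
    (PySem.List.sorted2 (c0 :: l) (fun c => -c.1) (fun c => c.2)).head? =
      some (l.foldl pvStep2 c0) := by
  unfold PySem.List.sorted2
  simp only [if_neg (by decide : ¬ (false = true)), List.foldl_cons]
  rw [head?_foldl_insertBy _ l _ c0 rfl]
  rfl

theorem main_inv (logs : List (Int × Int)) (bt bid st : Int) :
    (logs.foldl (fun (s : Int × Int × Int) (e : Int × Int) =>
      let time_taken := e.2 - s.2.2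
      if time_taken > s.1 ∨ (time_taken = s.1 ∧ e.1 < s.2.1) then
        (time_taken, e.1, e.2)
      else
        (s.1, s.2.1, e.2)) (bt, bid, st)).2.1 =
    (((logs.zip (st :: (logs.map (fun l => l.2)).dropLast)).map
        (fun p => (p.1.2 - p.2, p.1.1))).foldl pvStep2 (bt, bid)).2 := by
  induction logs generalizing bt bid st with
  | nil => rfl
  | cons e t ih =>
    obtain ⟨i, tm⟩ := e
    have hz : ((i, tm) :: t).zip (st :: ((((i, tm) :: t).map (fun l => l.2)).dropLast))
        = ((i, tm), st) :: t.zip (tm :: (t.map (fun l => l.2)).dropLast) := by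
      cases t with
      | nil => rfl
      | cons b t' => rfl
    rw [hz]
    simp only [List.map_cons, List.foldl_cons]
    rw [ih]
    have hcond : ((tm - st > bt ∨ (tm - st = bt ∧ i < bid)) ↔
        pvBefore (tm - st, i) (bt, bid) = true) := by
      simp [pvBefore]; omega
    by_cases h : tm - st > bt ∨ (tm - st = bt ∧ i < bid)
    · rw [if_pos h]
      have : pvStep2 (bt, bid) (tm - st, i) = (tm - st, i) := by
        unfold pvStep2; rw [if_pos (hcond.mp h)]
      rw [this]
    · rw [if_neg h]
      have : pvStep2 (bt, bid) (tm - st, i) = (bt, bid) := by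
        unfold pvStep2
        rw [if_neg (fun hc => h (hcond.mpr hc))]
      rw [this]

-- ===== VERDICT (by name: the statement is the Claim_ definition above) =====
theorem longestWorkingEmployee_spec : Claim_equal_longestWorkingEmployee := by
  intro n logs _
  simp only [Spec_longestWorkingEmployee, longestWorkingEmployee, longestWorkingEmployee_alt]
  have h := head?_sorted2_cons (0, 0)
    ((logs.zip (0 :: (logs.map (fun l => l.2)).dropLast)).map (fun p => (p.1.2 - p.2, p.1.1)))
  cases hs : PySem.List.sorted2
      ((0, 0) :: (logs.zip (0 :: (logs.map (fun l => l.2)).dropLast)).map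
        (fun p => (p.1.2 - p.2, p.1.1))) (fun c => -c.1) (fun c => c.2) with
  | nil => rw [hs] at h; simp at h
  | cons c rest =>
    rw [hs] at h
    simp only [List.head?_cons, Option.some.injEq] at h
    rw [main_inv logs 0 0 0, ← h]
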